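-- pv_equiv track=rewrite | github.com/HustleHarder86/ProgrammaticSEOTool | backend/agents/variable_generator.py | _generate_all_titles
-- ===== SOURCE A (Python) =====
-- from typing import List, Dict, Any, Optional, Tuple
--
-- def _generate_all_titles(
--
--     template_pattern: str,
--     variable_values: Dict[str, List[str]]
-- ) -> List[str]:
--     """Generate all possible title combinations"""
--
--     # Single variable case
--     if len(variable_values) == 1:
--         var_name = list(variable_values.keys())[0]
--         titles = []
--         for value in variable_values[var_name]:
--             title = template_pattern.replace(f"{{{var_name}}}", value)
--             title = title.replace(f"[{var_name}]", value)
--             titles.append(title)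
--         return titles
--
--     # Multiple variables case - generate all combinations
--     titles = []
--     variable_names = list(variable_values.keys())
--
--     def generate_combinations(index: int, current_values: Dict[str, str]):
--         if index == len(variable_names):
--             # Generate title with current combination
--             title = template_pattern
--             for var_name, value in current_values.items():
--                 title = title.replace(f"{{{var_name}}}", value)
--                 title = title.replace(f"[{var_name}]", value)
--             titles.append(title)
--             return
--
--         var_name = variable_names[index]
--         for value in variable_values[var_name]:
--             current_values[var_name] = value
--             generate_combinations(index + 1, current_values)
--
--     generate_combinations(0, {})
--     return titles
-- ===== SOURCE B (Python) =====
-- def _generate_all_titles(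
--     template_pattern: str,
--     variable_values: dict
-- ) -> list:
--     """Generate all possible title combinations"""
--     # Iteratively expand the list of partial titles, one variable at a time.
--     combos = [template_pattern]
--     for name in variable_values:
--         brace, bracket = "{" + name + "}", "[" + name + "]"
--         combos = [t.replace(brace, value).replace(bracket, value)
--                   for t in combos for value in variable_values[name]]
--     return combos
-- ===== Notes on version B (the rewrite author's own statement) =====
-- stated objective: simpler
-- what changed: Replaces the single-variable special case plus the V-deep recursive generate_combinations helper by one flat loop that expands a list of partial titles variable by variable, applying each variable's replacement as soon as it is introduced.
import Mathlib
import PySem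

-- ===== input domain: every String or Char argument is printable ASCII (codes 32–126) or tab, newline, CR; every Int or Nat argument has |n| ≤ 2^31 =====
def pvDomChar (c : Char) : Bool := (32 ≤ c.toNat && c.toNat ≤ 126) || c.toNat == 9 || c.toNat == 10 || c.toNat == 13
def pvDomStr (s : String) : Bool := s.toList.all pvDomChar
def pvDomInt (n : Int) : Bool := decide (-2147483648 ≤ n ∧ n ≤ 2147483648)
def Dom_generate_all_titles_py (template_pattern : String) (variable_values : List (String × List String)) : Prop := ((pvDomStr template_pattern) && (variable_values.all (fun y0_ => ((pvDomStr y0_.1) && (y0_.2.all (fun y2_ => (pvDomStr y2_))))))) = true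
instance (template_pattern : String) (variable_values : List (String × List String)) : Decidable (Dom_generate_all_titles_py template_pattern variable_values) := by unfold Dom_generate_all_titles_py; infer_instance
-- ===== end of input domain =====

-- B replaces A's single-variable special case plus V-deep recursion by one iterative
-- fold that expands the list of partial titles variable by variable (simpler/idiomatic).

-- ===== PORT A =====
-- the per-combination replacement: title = title.replace("{n}",v).replace("[n]",v) over current_values.items()
def pvAReplace (template_pattern : String) (current_values : PySem.Dict String String) : String :=
  current_values.items.foldl
    (fun title p =>
      PySem.Str.replace (PySem.Str.replace title ("{" ++ p.1 ++ "}") p.2) ("[" ++ p.1 ++ "]") p.2)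
    template_pattern

-- generate_combinations: Python mutates current_values in place, but every key is
-- (re)assigned before each recursive call, so passing the inserted dict is the same leaf dict.
def pvGenComb (template_pattern : String) (vv : PySem.Dict String (List String)) :
    List String → PySem.Dict String String → List String
  | [], cur => [pvAReplace template_pattern cur]
  | n :: rest, cur =>
      (vv.getD n []).foldl
        (fun titles v => titles ++ pvGenComb template_pattern vv rest (cur.insert n v)) []

def generate_all_titles_py (template_pattern : String) (variable_values : List (String × List String)) : List String :=
  let d := PySem.Dict.mk variable_values
  if variable_values.length == 1 then
    let var_name := (variable_values.map Prod.fst).headD ""   -- list(keys)[0]; length is 1 so the list is nonempty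
    (d.getD var_name []).foldl
      (fun titles value =>
        titles ++ [PySem.Str.replace (PySem.Str.replace template_pattern ("{" ++ var_name ++ "}") value)
                    ("[" ++ var_name ++ "]") value]) []
  else
    pvGenComb template_pattern d (variable_values.map Prod.fst) PySem.Dict.empty

-- ===== PORT B =====
def generate_all_titles_py_alt (template_pattern : String) (variable_values : List (String × List String)) : List String :=
  (variable_values.map Prod.fst).foldl
    (fun combos name =>
      combos.flatMap (fun t =>
        ((PySem.Dict.mk variable_values).getD name []).map (fun value =>
          PySem.Str.replace (PySem.Str.replace t ("{" ++ name ++ "}") value) ("[" ++ name ++ "]") value)))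
    [template_pattern]

-- ===== PRECONDITION & SPEC =====
-- Pre_ excludes association lists with duplicate keys: a Python dict has unique keys by
-- construction, so such lists do not encode any input A can receive.
def Pre_generate_all_titles_py (template_pattern : String) (variable_values : List (String × List String)) : Prop :=
  (variable_values.map Prod.fst).Nodup
instance (template_pattern : String) (variable_values : List (String × List String)) : Decidable (Pre_generate_all_titles_py template_pattern variable_values) := by unfold Pre_generate_all_titles_py; infer_instance

def pvWitness_generate_all_titles_py : String × (List (String × List String)) :=
  ("Best {service} in [city]", [("service", ["plumber", "roofer"]), ("city", ["Aix", "Bonn"])])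

def Spec_generate_all_titles_py (template_pattern : String) (variable_values : List (String × List String)) (out : List String) : Prop := out = generate_all_titles_py_alt template_pattern variable_values
instance (template_pattern : String) (variable_values : List (String × List String)) (out : List String) : Decidable (Spec_generate_all_titles_py template_pattern variable_values out) := by unfold Spec_generate_all_titles_py; infer_instance

-- ===== CLAIM (what is proved, stated in full; the proofs are below) =====
def Claim_equal_generate_all_titles_py : Prop := ∀ (template_pattern : String) (variable_values : List (String × List String)), Dom_generate_all_titles_py template_pattern variable_values → Pre_generate_all_titles_py template_pattern variable_values → Spec_generate_all_titles_py template_pattern variable_values (generate_all_titles_py template_pattern variable_values)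

-- ===== LEMMAS AND PROOFS =====

-- abbreviations for the proof only
def pvStep (t : String) (p : String × String) : String :=
  PySem.Str.replace (PySem.Str.replace t ("{" ++ p.1 ++ "}") p.2) ("[" ++ p.1 ++ "]") p.2

def pvExpand (d : PySem.Dict String (List String)) (names : List String) (combos : List String) : List String :=
  names.foldl (fun combos name => combos.flatMap (fun t => (d.getD name []).map (fun v => pvStep t (name, v)))) combos

lemma pvExpand_append (d : PySem.Dict String (List String)) (names : List String)
    (as bs : List String) : pvExpand d names (as ++ bs) = pvExpand d names as ++ pvExpand d names bs := by
  induction names generalizing as bs with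
  | nil => rfl
  | cons n rest ih => simp only [pvExpand, List.foldl_cons, List.flatMap_append] at *; exact ih _ _

lemma pvExpand_flatMap (d : PySem.Dict String (List String)) (names : List String)
    (l : List String) : pvExpand d names l = l.flatMap (fun t => pvExpand d names [t]) := by
  induction l with
  | nil =>
    induction names with
    | nil => rfl
    | cons n rest ih => simpa [pvExpand] using ih
  | cons x xs ih =>
    have : x :: xs = [x] ++ xs := rfl
    rw [this, pvExpand_append, ih]; simp

lemma pvFlatten_singleton (g : String → String) (vals : List String) :
    (vals.map (fun x => [g x])).flatten = vals.map g := by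
  induction vals with
  | nil => rfl
  | cons x xs ih => simp [ih]

lemma pvAReplace_insert (tp : String) (cur : PySem.Dict String String) (n v : String)
    (h : cur.contains n = false) :
    pvAReplace tp (cur.insert n v) = pvStep (pvAReplace tp cur) (n, v) := by
  unfold pvAReplace pvStep
  rw [PySem.Dict.items_insert_of_not_contains _ _ h, List.foldl_append]
  rfl

lemma pvGenComb_eq_expand (tp : String) (d : PySem.Dict String (List String))
    (names : List String) (cur : PySem.Dict String String)
    (hnd : names.Nodup) (hfresh : ∀ m ∈ names, cur.contains m = false) :
    pvGenComb tp d names cur = pvExpand d names [pvAReplace tp cur] := by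
  induction names generalizing cur with
  | nil => rfl
  | cons n rest ih =>
    have hnd' := List.nodup_cons.mp hnd
    rw [pvGenComb, PySem.List.foldl_append_eq_flatMap]
    simp only [List.nil_append]
    have key : ∀ v, pvGenComb tp d rest (cur.insert n v)
        = pvExpand d rest [pvStep (pvAReplace tp cur) (n, v)] := by
      intro v
      have hfresh' : ∀ m ∈ rest, (cur.insert n v).contains m = false := by
        intro m hm
        have hne : m ≠ n := fun h => hnd'.1 (h ▸ hm)
        simp [PySem.Dict.contains_insert, hne, hfresh m (List.mem_cons_of_mem _ hm)]
      rw [ih (cur.insert n v) hnd'.2 hfresh',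
        pvAReplace_insert tp cur n v (hfresh n (by simp))]
    calc (d.getD n []).flatMap (fun v => pvGenComb tp d rest (cur.insert n v))
        = (d.getD n []).flatMap (fun v => pvExpand d rest [pvStep (pvAReplace tp cur) (n, v)]) :=
          List.flatMap_congr (fun v _ => key v)
      _ = pvExpand d (n :: rest) [pvAReplace tp cur] := by
          have h2 : pvExpand d (n :: rest) [pvAReplace tp cur]
              = pvExpand d rest ((d.getD n []).map (fun v => pvStep (pvAReplace tp cur) (n, v))) := by
            simp [pvExpand]
          rw [h2, pvExpand_flatMap, List.flatMap_map]

-- ===== VERDICT (by name: the statement is the Claim_ definition above) =====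
theorem generate_all_titles_py_spec : Claim_equal_generate_all_titles_py := by
  intro tp vv _ hpre
  unfold Pre_generate_all_titles_py at hpre
  unfold Spec_generate_all_titles_py generate_all_titles_py generate_all_titles_py_alt
  by_cases h1 : vv.length = 1
  · obtain ⟨n, vals, rfl⟩ : ∃ n vals, vv = [(n, vals)] := by
      match vv, h1 with
      | [(n, vals)], _ => exact ⟨_, _, rfl⟩
    simp [PySem.Dict.getD_eq_get?_getD, PySem.Dict.get?_mk_cons, pvFlatten_singleton]
  · have hne : (vv.length == 1) = false := by simpa using h1
    simp only [hne, Bool.false_eq_true, if_false]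
    rw [pvGenComb_eq_expand tp _ _ _ hpre (fun m _ => by simp [PySem.Dict.contains_empty])]
    simp [pvExpand, pvStep, pvAReplace, PySem.Dict.empty]
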